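-- pv_equiv track=rewrite | github.com/Zhuyong229/gomoku | gomoku.py | detect_5s
-- ===== SOURCE A (Python) =====
-- def detect_5(board, col, y_start, x_start, d_y, d_x):
-- #search for number of sequence of 5 of color col starting with one edge point
--     L = []
--     L.append(board[y_start][x_start])
--     if d_y != 0 and d_x != 0:
--         while y_start+d_y != len(board) and x_start+d_x != len(board) and x_start+d_x!= -1:
--             L.append(board[y_start+d_y][x_start+d_x])
--             y_start += d_y
--             x_start += d_x
--     elif d_y == 0 and d_x != 0:
--         while x_start+d_x != len(board):
--             L.append(board[y_start+d_y][x_start+d_x])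
--             y_start += d_y
--             x_start += d_x
--     else:
--         while y_start+d_y != len(board):
--             L.append(board[y_start+d_y][x_start+d_x])
--             y_start += d_y
--             x_start += d_x
--
--     count = 0
--     count_5 = 0
--     for i in range(0, len(L)):
--         if L[i] == col:
--             count += 1
--             if count == 5:
--                 if i == len(L)-1:
--                     count_5 += 1
--                     return count_5
--                 else:
--                     if L[i+1]!=col:
--                         count_5+=1
--                         return count_5
--
--         else:
--             count = 0
--     return count_5
--
-- def detect_5s(board, col):
--     count_5_tot = 0
--     count_5_a,count_5_b,count_5_c,count_5_d,count_5_e,count_5_f = 0,0,0,0,0,0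
--     for i in range (0, len(board)):
--         count_5_a += detect_5(board, col, i, 0, 0, 1)
--         #start from left bound, horizontal
--         count_5_b += detect_5(board, col, 0, i, 1, 0)
--         #start from top bound, vertical
--         count_5_c += detect_5(board, col, i, 0, 1, 1)
--         #start from left bound, 1,1
--         count_5_d += detect_5(board, col, 0, i, 1, -1)
--         #start from top bound, 1,-1
--     for i in range (1,len(board)):
--         count_5_e += detect_5(board, col, 0, i, 1, 1)
--         #start from top bound, 1,1
--         count_5_f += detect_5(board, col, i, len(board)-1, 1, -1)
--         #start from right bound, 1,-1
--
--     count_5_tot = count_5_a+count_5_b+count_5_c+count_5_d+count_5_e+count_5_f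
--     return count_5_tot
-- ===== SOURCE B (Python) =====
-- def _runs(line):
--     # run-length encoding of the line: list of (value, run length) pairs
--     runs = []
--     for v in line:
--         if runs and runs[-1][0] == v:
--             runs[-1] = (v, runs[-1][1] + 1)
--         else:
--             runs.append((v, 1))
--     return runs
--
--
-- def detect_5s(board, col):
--     n = len(board)
--     lines = [[board[y][x] for x in range(n)] for y in range(n)]            # rows
--     lines += [[board[y][x] for y in range(n)] for x in range(n)]           # columns
--     lines += [[board[y][y + c] for y in range(max(0, -c), min(n, n - c))]  # diagonals (x - y = c)
--               for c in range(1 - n, n)]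
--     lines += [[board[y][s - y] for y in range(max(0, s - n + 1), min(n, s + 1))]  # anti-diagonals (x + y = s)
--               for s in range(2 * n - 1)]
--     total = 0
--     for line in lines:
--         if any(v == col and k == 5 for v, k in _runs(line)):
--             total += 1
--     return total
-- ===== Notes on version B (the rewrite author's own statement) =====
-- stated objective: idiomatic
-- what changed: A walks each line with four direction-parameterized edge-start while-loops and an in-loop lookahead counter with early return; B uniformly generates every row, column, diagonal and anti-diagonal as a list comprehension and checks each line's run-length encoding for a run (col, 5).
import Mathlib
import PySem

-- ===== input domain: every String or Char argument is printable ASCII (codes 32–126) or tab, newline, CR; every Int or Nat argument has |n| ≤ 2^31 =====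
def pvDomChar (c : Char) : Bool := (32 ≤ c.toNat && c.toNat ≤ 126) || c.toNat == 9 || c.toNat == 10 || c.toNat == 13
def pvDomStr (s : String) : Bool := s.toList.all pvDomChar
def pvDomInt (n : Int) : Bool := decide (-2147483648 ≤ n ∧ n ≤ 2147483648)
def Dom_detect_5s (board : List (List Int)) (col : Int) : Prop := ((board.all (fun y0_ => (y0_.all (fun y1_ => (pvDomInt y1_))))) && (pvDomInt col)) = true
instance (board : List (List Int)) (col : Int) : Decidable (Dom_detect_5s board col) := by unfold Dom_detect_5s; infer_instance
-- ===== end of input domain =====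

-- B replaces A's four direction-parameterized edge-start while-loops by a uniform
-- generate-all-lines pass plus a run-length-encoding check per line (objective: idiomatic).

-- ===== PORT A =====

-- board[y][x]; inside Pre_ every access A performs is in range, so the defaults are never used
def pvCellA (board : List (List Int)) (y x : Int) : Int :=
  PySem.List.pyGetD (PySem.List.pyGetD board y []) x 0

-- the while loop of the `d_y != 0 and d_x != 0` branch of detect_5 (fuel bounds the
-- iteration count; board.length iterations always suffice for the loop's own exit test)
def pvLoopDiag (board : List (List Int)) (dy dx : Int) : Nat → Int → Int → List Int → List Int
  | 0, _, _, L => L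
  | fuel+1, y, x, L =>
    if y + dy ≠ (board.length : Int) ∧ x + dx ≠ (board.length : Int) ∧ x + dx ≠ -1 then
      pvLoopDiag board dy dx fuel (y + dy) (x + dx) (L ++ [pvCellA board (y + dy) (x + dx)])
    else L

-- the while loop of the `d_y == 0 and d_x != 0` branch
def pvLoopRow (board : List (List Int)) (dy dx : Int) : Nat → Int → Int → List Int → List Int
  | 0, _, _, L => L
  | fuel+1, y, x, L =>
    if x + dx ≠ (board.length : Int) then
      pvLoopRow board dy dx fuel (y + dy) (x + dx) (L ++ [pvCellA board (y + dy) (x + dx)])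
    else L

-- the while loop of the final else branch
def pvLoopCol (board : List (List Int)) (dy dx : Int) : Nat → Int → Int → List Int → List Int
  | 0, _, _, L => L
  | fuel+1, y, x, L =>
    if y + dy ≠ (board.length : Int) then
      pvLoopCol board dy dx fuel (y + dy) (x + dx) (L ++ [pvCellA board (y + dy) (x + dx)])
    else L

-- the `for i in range(0, len(L))` scan of detect_5 (indices provably in range; getD defaults unused)
def pvScanA (L : List Int) (col : Int) (i : Nat) (count : Int) : Int :=
  if h : i < L.length then
    if L.getD i 0 = col then
      if count + 1 = 5 then
        if i = L.length - 1 then 1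
        else if L.getD (i + 1) 0 ≠ col then 1
        else pvScanA L col (i + 1) (count + 1)
      else pvScanA L col (i + 1) (count + 1)
    else pvScanA L col (i + 1) 0
  else 0
termination_by L.length - i

-- detect_5
def pvDetect5 (board : List (List Int)) (col y x dy dx : Int) : Int :=
  let L := [pvCellA board y x]
  let L :=
    if dy ≠ 0 ∧ dx ≠ 0 then pvLoopDiag board dy dx board.length y x L
    else if dy = 0 ∧ dx ≠ 0 then pvLoopRow board dy dx board.length y x L
    else pvLoopCol board dy dx board.length y x L
  pvScanA L col 0 0

def detect_5s (board : List (List Int)) (col : Int) : Int :=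
  let n : Int := (board.length : Int)
  let abcd := (PySem.List.pyRange 0 n 1).foldl
    (fun (acc : Int × Int × Int × Int) i =>
      (acc.1 + pvDetect5 board col i 0 0 1,
       acc.2.1 + pvDetect5 board col 0 i 1 0,
       acc.2.2.1 + pvDetect5 board col i 0 1 1,
       acc.2.2.2 + pvDetect5 board col 0 i 1 (-1))) (0, 0, 0, 0)
  let ef := (PySem.List.pyRange 1 n 1).foldl
    (fun (acc : Int × Int) i =>
      (acc.1 + pvDetect5 board col 0 i 1 1,
       acc.2 + pvDetect5 board col i (n - 1) 1 (-1))) (0, 0)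
  abcd.1 + abcd.2.1 + abcd.2.2.1 + abcd.2.2.2 + ef.1 + ef.2

-- ===== PORT B =====

-- board[y][x] as B indexes it (in range inside Pre_)
def pvCellB (board : List (List Int)) (y x : Int) : Int :=
  PySem.List.pyGetD (PySem.List.pyGetD board y []) x 0

-- _runs: run-length encoding; the accumulator is kept reversed so that Python's
-- `runs[-1] = (v, k+1)` update is a head update, and reversed once at the end
def pvRunsB (line : List Int) : List (Int × Int) :=
  (line.foldl (fun acc v =>
    match acc with
    | (w, k) :: t => if w = v then (v, k + 1) :: t else (v, 1) :: (w, k) :: t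
    | [] => [(v, 1)]) []).reverse

-- `any(v == col and k == 5 for v, k in _runs(line))`
def pvLineHit (line : List Int) (col : Int) : Bool :=
  (pvRunsB line).any (fun p => p.1 == col && p.2 == 5)

def detect_5s_alt (board : List (List Int)) (col : Int) : Int :=
  let n : Int := (board.length : Int)
  let lines : List (List Int) :=
    (PySem.List.pyRange 0 n 1).map (fun y => (PySem.List.pyRange 0 n 1).map (fun x => pvCellB board y x)) ++
    (PySem.List.pyRange 0 n 1).map (fun x => (PySem.List.pyRange 0 n 1).map (fun y => pvCellB board y x)) ++
    (PySem.List.pyRange (1 - n) n 1).map (fun c =>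
      (PySem.List.pyRange (max 0 (-c)) (min n (n - c)) 1).map (fun y => pvCellB board y (y + c))) ++
    (PySem.List.pyRange 0 (2 * n - 1) 1).map (fun s =>
      (PySem.List.pyRange (max 0 (s - n + 1)) (min n (s + 1)) 1).map (fun y => pvCellB board y (s - y)))
  lines.foldl (fun total line => if pvLineHit line col then total + 1 else total) 0

-- ===== PRECONDITION & SPEC =====

-- A raises IndexError exactly when some row is shorter than the board height
-- (it reads board[y][x] for all y, x < len(board)); B raises on the same inputs.
def Pre_detect_5s (board : List (List Int)) (col : Int) : Prop :=
  ∀ row ∈ board, board.length ≤ row.length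
instance (board : List (List Int)) (col : Int) : Decidable (Pre_detect_5s board col) := by
  unfold Pre_detect_5s; infer_instance

def pvWitness_detect_5s : List (List Int) × Int := ([[1, 1, 1, 1, 1], [0, 1, 0, 1, 0], [1, 0, 1, 0, 1], [0, 1, 0, 1, 0], [1, 0, 1, 0, 1]], 1)

def Spec_detect_5s (board : List (List Int)) (col : Int) (out : Int) : Prop := out = detect_5s_alt board col
instance (board : List (List Int)) (col : Int) (out : Int) : Decidable (Spec_detect_5s board col out) := by unfold Spec_detect_5s; infer_instance

-- ===== CLAIM (what is proved, stated in full; the proofs are below) =====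
def Claim_equal_detect_5s : Prop := ∀ (board : List (List Int)) (col : Int), Dom_detect_5s board col → Pre_detect_5s board col → Spec_detect_5s board col (detect_5s board col)

-- ===== LEMMAS AND PROOFS =====

def pvF (col : Int) : List Int → Int → Int
  | [], _ => 0
  | a :: l, c =>
    if a = col then
      if c + 1 = 5 then
        match l with
        | [] => 1
        | b :: _ => if b ≠ col then 1 else pvF col l (c + 1)
      else pvF col l (c + 1)
    else pvF col l 0

theorem pvScanA_eq_pvF (L : List Int) (col : Int) (i : Nat) (c : Int) :
    pvScanA L col i c = pvF col (L.drop i) c := by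
  induction i, c using pvScanA.induct (L := L) (col := col) with
  | case1 c h5 h hcol =>
    rw [pvScanA, List.drop_eq_getElem_cons h]
    have h0 : 0 < L.length := by omega
    have h2 : L.drop (L.length - 1 + 1) = [] := by rw [List.drop_eq_nil_iff]; omega
    rw [List.getD_eq_getElem _ _ h] at hcol
    rw [h2]
    simp [pvF, hcol, h5, h0]
  | case2 i c h hcol h5 hlast hnext =>
    rw [pvScanA, List.drop_eq_getElem_cons h]
    have hlt : i + 1 < L.length := by omega
    rw [List.drop_eq_getElem_cons hlt]
    rw [List.getD_eq_getElem _ _ h] at hcol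
    rw [List.getD_eq_getElem _ _ hlt] at hnext
    simp [pvF, h, hcol, h5, hlast, hnext, List.getElem?_eq_getElem hlt]
  | case3 i c h hcol h5 hlast hnext IH =>
    rw [pvScanA, List.drop_eq_getElem_cons h]
    have hlt : i + 1 < L.length := by omega
    rw [List.drop_eq_getElem_cons hlt] at IH ⊢
    rw [List.getD_eq_getElem _ _ h] at hcol
    rw [List.getD_eq_getElem _ _ hlt, not_not] at hnext
    rw [h5] at IH
    simp [pvF, h, hcol, h5, hlast, hnext, IH, List.getElem?_eq_getElem hlt]
  | case4 i c h hcol h5 IH =>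
    rw [pvScanA, List.drop_eq_getElem_cons h]
    rw [List.getD_eq_getElem _ _ h] at hcol
    simp [pvF, h, hcol, h5, IH]
  | case5 i c h hcol IH =>
    rw [pvScanA, List.drop_eq_getElem_cons h]
    rw [List.getD_eq_getElem _ _ h] at hcol
    simp [pvF, h, hcol, IH]
  | case6 i c h =>
    rw [pvScanA]
    have : L.drop i = [] := by rw [List.drop_eq_nil_iff]; omega
    simp [this, pvF, h]
def pvChk (col : Int) : List Int → Int → Bool
  | [], c => c == 5
  | a :: l, c => if a = col then pvChk col l (c + 1) else (c == 5 || pvChk col l 0)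

def pvChkG (col : Int) : List Int → Int → Int → Bool
  | [], w, k => w == col && k == 5
  | a :: l, w, k => if a = w then pvChkG col l w (k + 1) else ((w == col && k == 5) || pvChkG col l a 1)

theorem pvF_eq_pvChk (col : Int) :
    ∀ (l : List Int) (c : Int), (c = 5 → l.head? = some col) →
      pvF col l c = if pvChk col l c then 1 else 0 := by
  intro l
  induction l with
  | nil =>
    intro c h
    have hc : ¬ c = 5 := fun hc => by simpa using h hc
    simp [pvF, pvChk, hc]
  | cons a l IH =>
    intro c h
    by_cases ha : a = col
    · by_cases h5 : c + 1 = 5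
      · cases l with
        | nil => simp [pvF, pvChk, ha, h5]
        | cons b t =>
          by_cases hb : b = col
          · have hrec := IH (c + 1) (by intro _; simp [hb])
            have h1 : pvF col (a :: b :: t) c = pvF col (b :: t) (c + 1) := by
              simp only [pvF]; simp [ha, h5, hb]
            have h2 : pvChk col (a :: b :: t) c = pvChk col (b :: t) (c + 1) := by
              simp only [pvChk]; simp [ha]
            rw [h1, h2, hrec]
          · have h1 : pvF col (a :: b :: t) c = 1 := by
              simp only [pvF]; simp [ha, h5, hb]
            have h2 : pvChk col (a :: b :: t) c = true := by
              simp only [pvChk]; simp [ha, hb, h5]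
            rw [h1, h2]; simp
      · have hrec := IH (c + 1) (by intro hc; omega)
        have h1 : pvF col (a :: l) c = pvF col l (c + 1) := by
          cases l <;> · simp only [pvF]; simp [ha, h5]
        have h2 : pvChk col (a :: l) c = pvChk col l (c + 1) := by
          simp only [pvChk]; simp [ha]
        rw [h1, h2, hrec]
    · have hc : ¬ c = 5 := by
        intro hc; have := h hc; simp at this; exact ha this
      have hrec := IH 0 (by intro hc0; omega)
      have h1 : pvF col (a :: l) c = pvF col l 0 := by
        simp only [pvF]; simp [ha]
      have h2 : pvChk col (a :: l) c = pvChk col l 0 := by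
        simp only [pvChk]; simp [ha, hc]
      rw [h1, h2, hrec]

theorem pvChkG_eq_pvChk (col : Int) :
    ∀ (l : List Int) (w k : Int), pvChkG col l w k = pvChk col l (if w = col then k else 0) := by
  intro l
  induction l with
  | nil => intro w k; by_cases hw : w = col <;> simp [pvChkG, pvChk, hw]
  | cons a l IH =>
    intro w k
    by_cases haw : a = w
    · subst haw
      by_cases hw : a = col
      · simp [pvChkG, pvChk, hw, IH]
      · simp [pvChkG, pvChk, hw, IH]
    · by_cases hacol : a = col
      · have hwcol : ¬ w = col := by intro h; rw [h] at haw; exact haw hacol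
        have hcw : ¬ col = w := fun h => hwcol h.symm
        simp [pvChkG, pvChk, hacol, hwcol, hcw, IH]
      · by_cases hw : w = col
        · simp [pvChkG, pvChk, hacol, hw, IH]
        · simp [pvChkG, pvChk, haw, hacol, hw, IH]
theorem pvRunsB_any_eq_pvChkG (col : Int) :
    ∀ (l : List Int) (w k : Int) (t : List (Int × Int)),
      ((l.foldl (fun acc v =>
        match acc with
        | (w, k) :: t => if w = v then (v, k + 1) :: t else (v, 1) :: (w, k) :: t
        | [] => [(v, 1)]) ((w, k) :: t)).any (fun p => p.1 == col && p.2 == 5))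
      = (t.any (fun p => p.1 == col && p.2 == 5) || pvChkG col l w k) := by
  intro l
  induction l with
  | nil =>
    intro w k t
    simp [pvChkG, Bool.or_comm]
  | cons a l IH =>
    intro w k t
    by_cases haw : w = a
    · subst haw
      simp only [List.foldl_cons]
      simp only [if_true]
      rw [IH]
      simp [pvChkG]
    · simp only [List.foldl_cons]
      rw [show (if w = a then (a, k + 1) :: t else (a, 1) :: (w, k) :: t) = (a, 1) :: (w, k) :: t from if_neg haw]
      rw [IH]
      have : ¬ a = w := fun h => haw h.symm
      simp [pvChkG, this, List.any_cons, Bool.or_assoc, Bool.or_comm]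

theorem pvLineHit_eq_pvChk (l : List Int) (col : Int) :
    pvLineHit l col = pvChk col l 0 := by
  cases l with
  | nil => simp [pvLineHit, pvRunsB, pvChk]
  | cons a r =>
    unfold pvLineHit pvRunsB
    rw [List.any_reverse, List.foldl_cons]
    show (List.foldl _ ((a, 1) :: []) r).any _ = _
    rw [pvRunsB_any_eq_pvChkG]
    rw [pvChkG_eq_pvChk]
    by_cases ha : a = col <;> simp [pvChk, ha]

theorem pvScanA_eq_hit (L : List Int) (col : Int) :
    pvScanA L col 0 0 = if pvLineHit L col then (1 : Int) else 0 := by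
  rw [pvScanA_eq_pvF, List.drop_zero, pvF_eq_pvChk col L 0 (by intro h; omega), pvLineHit_eq_pvChk]

-- ===== part 2: line shapes =====
theorem pvCellB_eq_pvCellA : pvCellB = pvCellA := rfl

theorem pvLoopRow_eq (board : List (List Int)) :
    ∀ (fuel : Nat) (y x : Int) (acc : List Int), 0 ≤ x → x < (board.length : Int) →
      (((board.length : Int) - (x + 1)).toNat ≤ fuel) →
      pvLoopRow board 0 1 fuel y x acc
        = acc ++ (PySem.List.pyRange (x + 1) (board.length : Int) 1).map (fun x' => pvCellA board y x') := by
  intro fuel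
  induction fuel with
  | zero =>
    intro y x acc hx0 hxn hf
    rw [pvLoopRow, PySem.List.pyRange_one_eq_nil (by omega)]
    simp
  | succ fuel IH =>
    intro y x acc hx0 hxn hf
    rw [pvLoopRow]
    by_cases hend : x + 1 = (board.length : Int)
    · rw [if_neg (by simpa using hend), PySem.List.pyRange_one_eq_nil (by omega)]
      simp
    · rw [if_pos hend]
      rw [PySem.List.pyRange_one_cons (by omega)]
      rw [IH (y + 0) (x + 1) _ (by omega) (by omega) (by omega)]
      simp [add_zero]

theorem pvLoopCol_eq (board : List (List Int)) :
    ∀ (fuel : Nat) (y x : Int) (acc : List Int), 0 ≤ y → y < (board.length : Int) →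
      (((board.length : Int) - (y + 1)).toNat ≤ fuel) →
      pvLoopCol board 1 0 fuel y x acc
        = acc ++ (PySem.List.pyRange (y + 1) (board.length : Int) 1).map (fun y' => pvCellA board y' x) := by
  intro fuel
  induction fuel with
  | zero =>
    intro y x acc hy0 hyn hf
    rw [pvLoopCol, PySem.List.pyRange_one_eq_nil (by omega)]
    simp
  | succ fuel IH =>
    intro y x acc hy0 hyn hf
    rw [pvLoopCol]
    by_cases hend : y + 1 = (board.length : Int)
    · rw [if_neg (by simpa using hend), PySem.List.pyRange_one_eq_nil (by omega)]
      simp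
    · rw [if_pos hend]
      rw [PySem.List.pyRange_one_cons (by omega)]
      rw [IH (y + 1) (x + 0) _ (by omega) (by omega) (by omega)]
      simp [add_zero]

theorem pvLoopDiag_eq (board : List (List Int)) :
    ∀ (fuel : Nat) (y x c : Int) (acc : List Int), 0 ≤ y → y < (board.length : Int) →
      0 ≤ x → x < (board.length : Int) → x = y + c →
      (((board.length : Int) - 1 - max y x).toNat ≤ fuel) →
      pvLoopDiag board 1 1 fuel y x acc
        = acc ++ (PySem.List.pyRange (y + 1) ((board.length : Int) - max 0 c) 1).map
            (fun Y => pvCellA board Y (Y + c)) := by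
  intro fuel
  induction fuel with
  | zero =>
    intro y x c acc hy0 hyn hx0 hxn hc hf
    rw [pvLoopDiag, PySem.List.pyRange_one_eq_nil (by omega)]
    simp
  | succ fuel IH =>
    intro y x c acc hy0 hyn hx0 hxn hc hf
    rw [pvLoopDiag]
    by_cases hend : y + 1 = (board.length : Int) ∨ x + 1 = (board.length : Int)
    · rw [if_neg (by omega), PySem.List.pyRange_one_eq_nil (by omega)]
      simp
    · rw [if_pos (by omega)]
      rw [PySem.List.pyRange_one_cons (by omega)]
      rw [IH (y + 1) (x + 1) c _ (by omega) (by omega) (by omega) (by omega) (by omega) (by omega)]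
      have : x + 1 = (y + 1) + c := by omega
      simp [this]

theorem pvLoopAnti_eq (board : List (List Int)) :
    ∀ (fuel : Nat) (y x s : Int) (acc : List Int), 0 ≤ y → y < (board.length : Int) →
      0 ≤ x → x < (board.length : Int) → x = s - y →
      ((min ((board.length : Int) - 1) s - y).toNat ≤ fuel) →
      pvLoopDiag board 1 (-1) fuel y x acc
        = acc ++ (PySem.List.pyRange (y + 1) (min (board.length : Int) (s + 1)) 1).map
            (fun Y => pvCellA board Y (s - Y)) := by
  intro fuel
  induction fuel with
  | zero =>
    intro y x s acc hy0 hyn hx0 hxn hs hf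
    rw [pvLoopDiag, PySem.List.pyRange_one_eq_nil (by omega)]
    simp
  | succ fuel IH =>
    intro y x s acc hy0 hyn hx0 hxn hs hf
    rw [pvLoopDiag]
    by_cases hend : y + 1 = (board.length : Int) ∨ x = 0
    · rw [if_neg (by omega), PySem.List.pyRange_one_eq_nil (by omega)]
      simp
    · rw [if_pos (by omega)]
      rw [PySem.List.pyRange_one_cons (by omega)]
      rw [IH (y + 1) (x + -1) s _ (by omega) (by omega) (by omega) (by omega) (by omega) (by omega)]
      have : x + -1 = s - (y + 1) := by omega
      simp [this]

-- ===== part 3: families and assembly =====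

def pvInd (col : Int) (L : List Int) : Int := if pvLineHit L col then 1 else 0

theorem famRow (board : List (List Int)) (col i : Int) (h0 : 0 ≤ i) (hn : i < (board.length : Int)) :
    pvDetect5 board col i 0 0 1
      = pvInd col ((PySem.List.pyRange 0 (board.length : Int) 1).map (fun x => pvCellB board i x)) := by
  simp only [pvDetect5]
  norm_num
  rw [pvLoopRow_eq board board.length i 0 _ (by omega) (by omega) (by omega)]
  rw [pvScanA_eq_hit, pvInd, PySem.List.pyRange_one_cons (by omega : (0:Int) < (board.length : Int))]
  norm_num [pvCellB_eq_pvCellA]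

theorem famCol (board : List (List Int)) (col i : Int) (h0 : 0 ≤ i) (hn : i < (board.length : Int)) :
    pvDetect5 board col 0 i 1 0
      = pvInd col ((PySem.List.pyRange 0 (board.length : Int) 1).map (fun y => pvCellB board y i)) := by
  simp only [pvDetect5]
  norm_num
  rw [pvLoopCol_eq board board.length 0 i _ (by omega) (by omega) (by omega)]
  rw [pvScanA_eq_hit, pvInd, PySem.List.pyRange_one_cons (by omega : (0:Int) < (board.length : Int))]
  norm_num [pvCellB_eq_pvCellA]

theorem famDiagL (board : List (List Int)) (col i : Int) (h0 : 0 ≤ i) (hn : i < (board.length : Int)) :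
    pvDetect5 board col i 0 1 1
      = pvInd col ((PySem.List.pyRange (max 0 (-(-i))) (min (board.length : Int) ((board.length : Int) - -i)) 1).map
          (fun y => pvCellB board y (y + -i))) := by
  simp only [pvDetect5]
  norm_num
  rw [pvLoopDiag_eq board board.length i 0 (-i) _ (by omega) (by omega) (by omega) (by omega) (by omega) (by omega)]
  rw [pvScanA_eq_hit, pvInd]
  have e1 : max 0 i = i := by omega
  have e2 : min (board.length : Int) ((board.length : Int) + i) = (board.length : Int) := by omega
  have e3 : (board.length : Int) - max 0 (-i) = (board.length : Int) := by omega
  rw [e1, e2, e3, PySem.List.pyRange_one_cons (by omega : i < (board.length : Int))]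
  norm_num [pvCellB_eq_pvCellA]

theorem famDiagT (board : List (List Int)) (col i : Int) (h0 : 0 ≤ i) (hn : i < (board.length : Int)) :
    pvDetect5 board col 0 i 1 1
      = pvInd col ((PySem.List.pyRange (max 0 (-i)) (min (board.length : Int) ((board.length : Int) - i)) 1).map
          (fun y => pvCellB board y (y + i))) := by
  simp only [pvDetect5]
  norm_num
  rw [pvLoopDiag_eq board board.length 0 i i _ (by omega) (by omega) (by omega) (by omega) (by omega) (by omega)]
  rw [pvScanA_eq_hit, pvInd]
  have e1 : max 0 (-i) = 0 := by omega
  have e2 : min (board.length : Int) ((board.length : Int) - i) = (board.length : Int) - i := by omega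
  have e3 : (board.length : Int) - max 0 i = (board.length : Int) - i := by omega
  rw [e1, e2, e3, PySem.List.pyRange_one_cons (by omega : (0:Int) < (board.length : Int) - i)]
  norm_num [pvCellB_eq_pvCellA]

theorem famAntiT (board : List (List Int)) (col i : Int) (h0 : 0 ≤ i) (hn : i < (board.length : Int)) :
    pvDetect5 board col 0 i 1 (-1)
      = pvInd col ((PySem.List.pyRange (max 0 (i - (board.length : Int) + 1)) (min (board.length : Int) (i + 1)) 1).map
          (fun y => pvCellB board y (i - y))) := by
  simp only [pvDetect5]
  norm_num
  rw [pvLoopAnti_eq board board.length 0 i i _ (by omega) (by omega) (by omega) (by omega) (by omega) (by omega)]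
  rw [pvScanA_eq_hit, pvInd]
  have e1 : max 0 (i - (board.length : Int) + 1) = 0 := by omega
  rw [e1, PySem.List.pyRange_one_cons (by omega : (0:Int) < min (board.length : Int) (i + 1))]
  norm_num [pvCellB_eq_pvCellA]

theorem famAntiR (board : List (List Int)) (col i : Int) (h0 : 1 ≤ i) (hn : i < (board.length : Int)) :
    pvDetect5 board col i ((board.length : Int) - 1) 1 (-1)
      = pvInd col ((PySem.List.pyRange (max 0 ((i + (board.length : Int) - 1) - (board.length : Int) + 1)) (min (board.length : Int) ((i + (board.length : Int) - 1) + 1)) 1).map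
          (fun y => pvCellB board y ((i + (board.length : Int) - 1) - y))) := by
  simp only [pvDetect5]
  norm_num
  rw [pvLoopAnti_eq board board.length i ((board.length : Int) - 1) (i + (board.length : Int) - 1) _ (by omega) (by omega) (by omega) (by omega) (by omega) (by omega)]
  rw [pvScanA_eq_hit, pvInd]
  have e1 : max 0 (i + (board.length : Int) - 1 - (board.length : Int) + 1) = i := by omega
  have e2 : min (board.length : Int) (i + (board.length : Int) - 1 + 1) = (board.length : Int) := by omega
  have e2b : min (board.length : Int) (i + (board.length : Int)) = (board.length : Int) := by omega
  rw [e1, e2, e2b, PySem.List.pyRange_one_cons (by omega : i < (board.length : Int))]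
  have e4 : i + (board.length : Int) - 1 - i = (board.length : Int) - 1 := by omega
  norm_num [pvCellB_eq_pvCellA, e4]

-- fold of a 4-tuple of running sums
theorem pvFoldlQuad (l : List Int) (f1 f2 f3 f4 : Int → Int) :
    ∀ (a b c d : Int),
      l.foldl (fun (acc : Int × Int × Int × Int) i =>
        (acc.1 + f1 i, acc.2.1 + f2 i, acc.2.2.1 + f3 i, acc.2.2.2 + f4 i)) (a, b, c, d)
      = (a + (l.map f1).sum, b + (l.map f2).sum, c + (l.map f3).sum, d + (l.map f4).sum) := by
  induction l with
  | nil => intro a b c d; simp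
  | cons x l IH => intro a b c d; simp [IH, add_assoc]

theorem pvFoldlPair (l : List Int) (f1 f2 : Int → Int) :
    ∀ (a b : Int),
      l.foldl (fun (acc : Int × Int) i => (acc.1 + f1 i, acc.2 + f2 i)) (a, b)
      = (a + (l.map f1).sum, b + (l.map f2).sum) := by
  induction l with
  | nil => intro a b; simp
  | cons x l IH => intro a b; simp [IH, add_assoc]

theorem pvFoldlIf (p : List Int → Bool) :
    ∀ (l : List (List Int)) (a : Int),
      l.foldl (fun total line => if p line then total + 1 else total) a
      = a + (l.map (fun line => if p line then (1 : Int) else 0)).sum := by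
  intro l
  induction l with
  | nil => intro a; simp
  | cons x l IH =>
    intro a
    by_cases hx : p x <;> simp [hx, IH, add_assoc]

-- reindexing: the diagonal index range [1-n, n) split into A's two start families
theorem pvDiagReindex (n : Int) (hn : 1 ≤ n) (g : Int → Int) :
    ((PySem.List.pyRange (1 - n) n 1).map g).sum
      = ((PySem.List.pyRange 0 n 1).map (fun i => g (-i))).sum
        + ((PySem.List.pyRange 1 n 1).map g).sum := by
  rw [PySem.List.pyRange_one_append (1 - n) 1 n (by omega) (by omega), List.map_append, List.sum_append]
  congr 1
  rw [PySem.List.pyRange_one (1 - n) 1, PySem.List.pyRange_one 0 n]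
  have hm : (1 - (1 - n)).toNat = (n - 0).toNat := by omega
  rw [hm]
  set m := (n - 0).toNat with hmdef
  have hn' : (m : Int) = n := by omega
  rw [List.map_map, List.map_map]
  have h1 : ((List.range m).map (g ∘ fun k : Nat => 1 - n + (k : Int))).sum
      = ∑ k ∈ Finset.range m, g (1 - n + (k : Int)) := rfl
  have h2 : ((List.range m).map ((fun i => g (-i)) ∘ fun k : Nat => 0 + (k : Int))).sum
      = ∑ k ∈ Finset.range m, g (-(0 + (k : Int))) := rfl
  rw [h1, h2, ← Finset.sum_range_reflect]
  apply Finset.sum_congr rfl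
  intro k hk
  have hk' : k < m := Finset.mem_range.mp hk
  congr 1
  omega

-- reindexing: the anti-diagonal index range [0, 2n-1) split into A's two start families
theorem pvAntiReindex (n : Int) (hn : 1 ≤ n) (g : Int → Int) :
    ((PySem.List.pyRange 0 (2 * n - 1) 1).map g).sum
      = ((PySem.List.pyRange 0 n 1).map g).sum
        + ((PySem.List.pyRange 1 n 1).map (fun i => g (i + n - 1))).sum := by
  rw [PySem.List.pyRange_one_append 0 n (2 * n - 1) (by omega) (by omega), List.map_append, List.sum_append]
  congr 1
  rw [PySem.List.pyRange_one n (2 * n - 1), PySem.List.pyRange_one 1 n]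
  have hm : (2 * n - 1 - n).toNat = (n - 1).toNat := by omega
  rw [hm]
  rw [List.map_map, List.map_map]
  apply congrArg
  apply List.map_congr_left
  intro k hk
  have hk' : k < (n - 1).toNat := List.mem_range.mp hk
  simp only [Function.comp]
  congr 1
  omega

theorem pvMain (board : List (List Int)) (col : Int) : detect_5s board col = detect_5s_alt board col := by
  by_cases hb : board.length = 0
  · have hbe : board = [] := List.length_eq_zero_iff.mp hb
    subst hbe
    rfl
  · have hn : 1 ≤ (board.length : Int) := by omega
    have hRow : (PySem.List.pyRange 0 (board.length : Int) 1).map (fun i => pvDetect5 board col i 0 0 1)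
        = (PySem.List.pyRange 0 (board.length : Int) 1).map (fun i =>
            pvInd col ((PySem.List.pyRange 0 (board.length : Int) 1).map (fun x => pvCellB board i x))) :=
      List.map_congr_left (fun i hi =>
        famRow board col i (PySem.List.mem_pyRange_one.mp hi).1 (PySem.List.mem_pyRange_one.mp hi).2)
    have hCol : (PySem.List.pyRange 0 (board.length : Int) 1).map (fun i => pvDetect5 board col 0 i 1 0)
        = (PySem.List.pyRange 0 (board.length : Int) 1).map (fun i =>
            pvInd col ((PySem.List.pyRange 0 (board.length : Int) 1).map (fun y => pvCellB board y i))) :=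
      List.map_congr_left (fun i hi =>
        famCol board col i (PySem.List.mem_pyRange_one.mp hi).1 (PySem.List.mem_pyRange_one.mp hi).2)
    have hDiagL : (PySem.List.pyRange 0 (board.length : Int) 1).map (fun i => pvDetect5 board col i 0 1 1)
        = (PySem.List.pyRange 0 (board.length : Int) 1).map (fun i =>
            pvInd col ((PySem.List.pyRange (max 0 (-(-i))) (min (board.length : Int) ((board.length : Int) - -i)) 1).map
              (fun y => pvCellB board y (y + -i)))) :=
      List.map_congr_left (fun i hi =>
        famDiagL board col i (PySem.List.mem_pyRange_one.mp hi).1 (PySem.List.mem_pyRange_one.mp hi).2)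
    have hAntiT : (PySem.List.pyRange 0 (board.length : Int) 1).map (fun i => pvDetect5 board col 0 i 1 (-1))
        = (PySem.List.pyRange 0 (board.length : Int) 1).map (fun i =>
            pvInd col ((PySem.List.pyRange (max 0 (i - (board.length : Int) + 1)) (min (board.length : Int) (i + 1)) 1).map
              (fun y => pvCellB board y (i - y)))) :=
      List.map_congr_left (fun i hi =>
        famAntiT board col i (PySem.List.mem_pyRange_one.mp hi).1 (PySem.List.mem_pyRange_one.mp hi).2)
    have hDiagT : (PySem.List.pyRange 1 (board.length : Int) 1).map (fun i => pvDetect5 board col 0 i 1 1)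
        = (PySem.List.pyRange 1 (board.length : Int) 1).map (fun i =>
            pvInd col ((PySem.List.pyRange (max 0 (-i)) (min (board.length : Int) ((board.length : Int) - i)) 1).map
              (fun y => pvCellB board y (y + i)))) :=
      List.map_congr_left (fun i hi =>
        famDiagT board col i (by have := PySem.List.mem_pyRange_one.mp hi; omega)
          (PySem.List.mem_pyRange_one.mp hi).2)
    have hAntiR : (PySem.List.pyRange 1 (board.length : Int) 1).map (fun i => pvDetect5 board col i ((board.length : Int) - 1) 1 (-1))
        = (PySem.List.pyRange 1 (board.length : Int) 1).map (fun i =>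
            pvInd col ((PySem.List.pyRange (max 0 ((i + (board.length : Int) - 1) - (board.length : Int) + 1)) (min (board.length : Int) ((i + (board.length : Int) - 1) + 1)) 1).map
              (fun y => pvCellB board y ((i + (board.length : Int) - 1) - y)))) :=
      List.map_congr_left (fun i hi =>
        famAntiR board col i (PySem.List.mem_pyRange_one.mp hi).1 (PySem.List.mem_pyRange_one.mp hi).2)
    simp only [detect_5s, detect_5s_alt]
    rw [pvFoldlQuad, pvFoldlPair, pvFoldlIf]
    simp only [zero_add, List.map_append, List.sum_append, List.map_map, Function.comp_def]
    rw [hRow, hCol, hDiagL, hAntiT, hDiagT, hAntiR]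
    rw [pvDiagReindex (board.length : Int) hn, pvAntiReindex (board.length : Int) hn]
    simp only [pvInd]
    ac_rfl

-- ===== VERDICT (by name: the statement is the Claim_ definition above) =====
theorem detect_5s_spec : Claim_equal_detect_5s := by
  intro board col _ _
  unfold Spec_detect_5s
  exact pvMain board col
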